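-- pv_equiv track=rewrite | github.com/aungsh/inf1002-lab | lab-3/CountLetters.py | double_count
-- ===== SOURCE A (Python) =====
-- def letter_count(tmpStr):
--       letter_dict = {}
--       letters_list = list(tmpStr)
--       for letter in letters_list:
--             if letter in letter_dict:
--                   letter_dict[letter] = letter_dict[letter] + 1
--             else:
--                   letter_dict[letter] = 1
--
--       return letter_dict
--
-- def double_count(str1, str2):
--       dict1 = letter_count(str1)
--       dict2 = letter_count(str2)
--       combined_dict = {}
--       for key, value in dict1.items():
--             if key in dict2:
--                   combined_dict[key] = dict1[key] + dict2[key]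
--             else:
--                   combined_dict[key] = value
--
--       for key, value in dict2.items():
--             if key not in combined_dict:
--                   combined_dict[key] = value
--
--       return combined_dict
-- ===== SOURCE B (Python) =====
-- def double_count(str1, str2):
--     counts = {}
--     for ch in str1:
--         counts[ch] = counts.get(ch, 0) + 1
--     for ch in str2:
--         counts[ch] = counts.get(ch, 0) + 1
--     return counts
-- ===== Notes on version B (the rewrite author's own statement) =====
-- stated objective: simpler
-- what changed: B replaces A's two separate per-string count dicts plus a two-loop merge (sum-on-intersection, then add missing keys) with a single dict accumulated by one increment pass over str1 followed by one over str2.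
import Mathlib
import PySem

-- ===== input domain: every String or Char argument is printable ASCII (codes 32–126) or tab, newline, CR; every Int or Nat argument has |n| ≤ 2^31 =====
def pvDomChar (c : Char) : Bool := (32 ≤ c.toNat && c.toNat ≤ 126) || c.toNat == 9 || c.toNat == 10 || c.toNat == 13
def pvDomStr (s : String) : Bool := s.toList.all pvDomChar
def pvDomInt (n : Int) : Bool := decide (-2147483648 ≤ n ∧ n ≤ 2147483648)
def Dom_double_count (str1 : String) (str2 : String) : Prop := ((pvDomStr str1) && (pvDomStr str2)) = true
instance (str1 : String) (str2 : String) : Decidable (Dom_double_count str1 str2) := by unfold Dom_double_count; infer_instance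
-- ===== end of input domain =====

-- B folds both strings into ONE dict (d[ch] = d.get(ch,0)+1 twice) instead of A's
-- two count dicts merged by two loops; same behaviour, simpler decomposition.

-- ===== PORT A =====
-- iterating a Python string yields 1-character strings: key for char c is String.ofList [c]
def pvKeys (s : String) : List String := s.toList.map (fun c => String.ofList [c])

def letter_count (tmpStr : String) : PySem.Dict String Int :=
  (pvKeys tmpStr).foldl
    (fun d letter =>
      if d.contains letter then d.insert letter (d.getD letter 0 + 1)
      else d.insert letter 1)
    PySem.Dict.empty

def double_count (str1 : String) (str2 : String) : List (String × Int) :=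
  let dict1 := letter_count str1
  let dict2 := letter_count str2
  -- dict1[key] / dict2[key] are read only under 'key in' guards, so getD _ 0 is exact
  let combined := dict1.items.foldl
    (fun c kv =>
      if dict2.contains kv.1 then c.insert kv.1 (dict1.getD kv.1 0 + dict2.getD kv.1 0)
      else c.insert kv.1 kv.2)
    PySem.Dict.empty
  let combined := dict2.items.foldl
    (fun c kv => if c.contains kv.1 then c else c.insert kv.1 kv.2)
    combined
  combined.items

-- ===== PORT B =====
def double_count_alt (str1 : String) (str2 : String) : List (String × Int) :=
  let counts := (pvKeys str1).foldl
    (fun d ch => d.insert ch (d.getD ch 0 + 1)) PySem.Dict.empty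
  let counts := (pvKeys str2).foldl
    (fun d ch => d.insert ch (d.getD ch 0 + 1)) counts
  counts.items

-- ===== PRECONDITION & SPEC =====
def Spec_double_count (str1 : String) (str2 : String) (out : List (String × Int)) : Prop := out = double_count_alt str1 str2
instance (str1 : String) (str2 : String) (out : List (String × Int)) : Decidable (Spec_double_count str1 str2 out) := by unfold Spec_double_count; infer_instance

-- ===== CLAIM (what is proved, stated in full; the proofs are below) =====
def Claim_equal_double_count : Prop := ∀ (str1 : String) (str2 : String), Dom_double_count str1 str2 → Spec_double_count str1 str2 (double_count str1 str2)

-- ===== LEMMAS AND PROOFS =====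

-- A's guarded counting step is the unguarded increment step
lemma letter_count_eq_counter (s : String) :
    letter_count s = PySem.Dict.counter (pvKeys s) := by
  have hstep :
      (fun (d : PySem.Dict String Int) letter =>
        if d.contains letter then d.insert letter (d.getD letter 0 + 1)
        else d.insert letter 1)
      = (fun (d : PySem.Dict String Int) letter => d.insert letter (d.getD letter 0 + 1)) := by
    funext d letter
    by_cases h : d.contains letter = true
    · simp [h]
    · simp at h
      rw [PySem.Dict.getD_of_not_contains d 0 h]; simp [h]
  rw [letter_count, hstep, PySem.Dict.foldl_insert_getD_add_one_eq_counter]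

-- B is the counter of the concatenated key lists
lemma alt_eq_counter (str1 str2 : String) :
    double_count_alt str1 str2 = (PySem.Dict.counter (pvKeys str1 ++ pvKeys str2)).items := by
  rw [double_count_alt]
  rw [← PySem.Dict.foldl_insert_getD_add_one_eq_counter, List.foldl_append]

-- the second merge loop appends exactly the not-yet-present items
lemma foldl_keep_items (l : List (String × Int)) (c : PySem.Dict String Int)
    (hnd : (l.map (·.1)).Nodup) :
    (l.foldl (fun c kv => if c.contains kv.1 then c else c.insert kv.1 kv.2) c).items
      = c.items ++ l.filter (fun kv => !(c.contains kv.1)) := by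
  induction l generalizing c with
  | nil => simp
  | cons kv rest ih =>
    rw [List.map_cons] at hnd
    obtain ⟨hk, hrest⟩ := List.nodup_cons.mp hnd
    by_cases h : c.contains kv.1 = true
    · simp [List.foldl_cons, h, ih _ hrest]
    · simp only [Bool.not_eq_true] at h
      rw [List.foldl_cons, if_neg (by simp [h]), ih _ hrest,
        PySem.Dict.items_insert_of_not_contains _ _ h]
      have hfilter : rest.filter (fun p => !((c.insert kv.1 kv.2).contains p.1))
          = rest.filter (fun p => !(c.contains p.1)) := by
        apply List.filter_congr
        intro p hp
        have hne : p.1 ≠ kv.1 := fun he => hk (he ▸ List.mem_map_of_mem (f := (·.1)) hp)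
        simp [PySem.Dict.contains_insert, hne]
      rw [hfilter]
      simp [h, List.append_assoc]

theorem double_count_eq_alt (str1 str2 : String) :
    double_count str1 str2 = double_count_alt str1 str2 := by
  rw [alt_eq_counter]
  set L1 := pvKeys str1 with hL1
  set L2 := pvKeys str2 with hL2
  set S1 := PySem.Set.ofList L1 with hS1
  set S2 := PySem.Set.ofList L2 with hS2
  rw [double_count]
  simp only [letter_count_eq_counter]
  -- first loop: move the if inside the inserted value, then it is a fresh-key append over d1.items
  have hstep1 :
      (fun (c : PySem.Dict String Int) (kv : String × Int) =>
        if (PySem.Dict.counter L2).contains kv.1 then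
          c.insert kv.1 ((PySem.Dict.counter L1).getD kv.1 0 + (PySem.Dict.counter L2).getD kv.1 0)
        else c.insert kv.1 kv.2)
      = (fun (c : PySem.Dict String Int) (kv : String × Int) =>
          c.insert kv.1 (if (PySem.Dict.counter L2).contains kv.1 then
            (PySem.Dict.counter L1).getD kv.1 0 + (PySem.Dict.counter L2).getD kv.1 0 else kv.2)) := by
    funext c kv; by_cases h : (PySem.Dict.counter L2).contains kv.1 = true <;> simp [h]
  rw [hstep1]
  have hfresh := PySem.Dict.items_foldl_insert_fresh
      (l := (PySem.Dict.counter L1).items)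
      (k := fun kv => kv.1)
      (v := fun kv => if (PySem.Dict.counter L2).contains kv.1 then
          (PySem.Dict.counter L1).getD kv.1 0 + (PySem.Dict.counter L2).getD kv.1 0 else kv.2)
      (d := PySem.Dict.empty)
      (by intro a _; simp)
      (by exact PySem.Dict.nodup_keys_counter L1)
  set c1 := (PySem.Dict.counter L1).items.foldl
      (fun (c : PySem.Dict String Int) (kv : String × Int) =>
        c.insert kv.1 (if (PySem.Dict.counter L2).contains kv.1 then
          (PySem.Dict.counter L1).getD kv.1 0 + (PySem.Dict.counter L2).getD kv.1 0 else kv.2))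
      PySem.Dict.empty with hc1
  -- c1.items is S1 paired with the combined counts
  have hc1items : c1.items = S1.map (fun k => (k, ((L1 ++ L2).count k : Int))) := by
    rw [hc1, hfresh]
    rw [PySem.Dict.items_counter, List.map_map]
    simp only [show (PySem.Dict.empty : PySem.Dict String Int).items = [] from rfl, List.nil_append]
    apply List.map_congr_left
    intro k hk
    simp only [Function.comp, PySem.Dict.contains_counter, PySem.Dict.getD_counter]
    by_cases h2 : k ∈ L2
    · simp [h2, List.count_append]
    · simp [h2, List.count_append, List.count_eq_zero.mpr h2]
  -- second loop appends the keys of L2 that are new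
  have hc1keys : ∀ x, c1.contains x = decide (x ∈ S1) := by
    intro x
    rw [PySem.Dict.contains_eq_decide_mem_keys, PySem.Dict.keys, hc1items, List.map_map]
    simp [Function.comp]
  rw [foldl_keep_items _ _ (by
      rw [← PySem.Dict.keys]; exact PySem.Dict.nodup_keys_counter L2)]
  rw [hc1items, PySem.Dict.items_counter]
  -- rewrite the filter over the mapped items
  have hfilt : ((S2.map (fun k => (k, (L2.count k : Int)))).filter
        (fun kv => !(c1.contains kv.1)))
      = (S2.filter (fun k => !(decide (k ∈ S1)))).map (fun k => (k, (L2.count k : Int))) := by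
    rw [List.filter_map]
    congr 1
    apply List.filter_congr
    intro k _
    simp [hc1keys]
  rw [hfilt]
  -- the target: ofList (L1 ++ L2) splits as S1 ++ new part of S2
  rw [PySem.Dict.items_counter, PySem.Set.ofList_append, PySem.Set.update_eq_append_filter,
    List.map_append, ← hS1, ← hS2]
  have hpred : (fun y => !(PySem.Set.contains S1 y)) = (fun k => !(decide (k ∈ S1))) := by
    funext y
    by_cases h : y ∈ S1 <;> simp [PySem.Set.contains_eq_listContains, h]
  rw [hpred]
  congr 1
  apply List.map_congr_left
  intro k hk
  have hmem := List.mem_filter.mp hk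
  have hk1 : k ∉ L1 := by
    intro h
    have : k ∈ S1 := by rw [hS1]; exact (PySem.Set.mem_ofList _ _).mpr h
    simp [this] at hmem
  simp [List.count_append, List.count_eq_zero.mpr hk1]

-- ===== VERDICT (by name: the statement is the Claim_ definition above) =====
theorem double_count_spec : Claim_equal_double_count := by
  intro str1 str2 _
  unfold Spec_double_count
  exact double_count_eq_alt str1 str2
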